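-- pv_equiv track=rewrite | github.com/pypi-data/pypi-mirror-403 | packages/wafer-core/wafer_core-0.1.38.tar.gz/wafer_core-0.1.38/wafer_core/lib/kernel_scope/amdgcn/instruction_db.py | extract_mnemonic
-- ===== SOURCE A (Python) =====
-- from typing import Optional
--
-- def extract_mnemonic(instruction_line: str) -> Optional[str]:
--     """Extract the instruction mnemonic from an assembly line.
--
--     Handles various assembly line formats including labels, comments,
--     and directives.
--
--     Args:
--         instruction_line: A line from the assembly file
--
--     Returns:
--         The instruction mnemonic, or None if not an instruction
--
--     Example:
--         >>> extract_mnemonic("  v_add_f32 v0, v1, v2  ; comment")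
--         "v_add_f32"
--         >>> extract_mnemonic(".L_label:")
--         None
--     """
--     line = instruction_line.strip()
--
--     # Skip empty lines
--     if not line:
--         return None
--
--     # Skip comments
--     if line.startswith(";") or line.startswith("//"):
--         return None
--
--     # Skip directives (start with .)
--     if line.startswith("."):
--         return None
--
--     # Skip labels (end with :)
--     if ":" in line and not line.startswith((" ", "\t")):
--         # Could be a label, check if it's just a label
--         label_part = line.split(":")[0]
--         if label_part.replace("_", "").replace(".", "").isalnum():
--             # It's a label, check for instruction after colon
--             after_colon = line.split(":", 1)[1].strip()
--             if after_colon: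
--                 return extract_mnemonic(after_colon)
--             return None
--
--     # Remove inline comment
--     if ";" in line:
--         line = line.split(";")[0].strip()
--     if "//" in line:
--         line = line.split("//")[0].strip()
--
--     if not line:
--         return None
--
--     # Extract first word as mnemonic
--     parts = line.split()
--     if parts:
--         return parts[0]
--
--     return None
-- ===== SOURCE B (Python) =====
-- from typing import Optional
--
--
-- def extract_mnemonic(instruction_line: str) -> Optional[str]:
--     """Iterative re-implementation: a while-loop peels chained labels in place of
--     the recursion, and find/slice arithmetic replaces the split()-chains."""
--     line = instruction_line.strip()
--     # Peel leading labels (the recursion in the original).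
--     while True:
--         if not line:
--             return None
--         if line.startswith(";") or line.startswith("//") or line.startswith("."):
--             return None
--         colon = line.find(":")
--         if colon == -1:
--             break
--         head = line[:colon]
--         if not all(c.isalnum() or c in "._" for c in head):
--             break
--         if all(c in "._" for c in head):
--             break
--         line = line[colon + 1:].strip()
--     # Cut at each comment marker in turn.
--     for marker in (";", "//"):
--         pos = line.find(marker)
--         if pos != -1:
--             line = line[:pos].strip()
--     words = line.split()
--     return words[0] if words else None
-- ===== Notes on version B (the rewrite author's own statement) =====
-- stated objective: alternative
-- what changed: The tail-recursion over chained labels becomes an explicit while-loop, the split()[0]/split(':',1)[1]/replace-chain string surgery becomes find/slice arithmetic with per-character all() gates, and the two if-in-split comment blocks become a for-loop over the markers.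
import Mathlib
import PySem

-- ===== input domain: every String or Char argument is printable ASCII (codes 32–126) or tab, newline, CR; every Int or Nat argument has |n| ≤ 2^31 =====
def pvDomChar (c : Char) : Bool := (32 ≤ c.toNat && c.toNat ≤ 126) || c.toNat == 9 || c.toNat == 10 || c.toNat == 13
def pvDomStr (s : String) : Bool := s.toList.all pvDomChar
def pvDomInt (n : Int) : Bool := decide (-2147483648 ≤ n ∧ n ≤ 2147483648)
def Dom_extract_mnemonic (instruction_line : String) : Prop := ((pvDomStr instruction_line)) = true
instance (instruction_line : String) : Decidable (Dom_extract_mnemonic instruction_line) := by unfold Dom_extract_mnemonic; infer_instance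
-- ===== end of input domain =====

-- B replaces A's recursion over chained labels by a while-loop and A's split()/replace() string
-- surgery by find/slice arithmetic with per-character gates; same return value, similar cost.

-- first-occurrence bookkeeping used by the termination argument of port A (and by the proofs below)
def pvHOcc (sub : List Char) : List Char → Bool
  | [] => false
  | c :: t => sub.isPrefixOf (c :: t) || pvHOcc sub t

def pvFIdx (sub : List Char) : List Char → Nat
  | [] => 0
  | c :: t => if sub.isPrefixOf (c :: t) then 0 else pvFIdx sub t + 1

theorem pvStrip_length_le (l : List Char) : (PySem.Chars.strip l).length ≤ l.length := by
  unfold PySem.Chars.strip PySem.Chars.rstrip PySem.Chars.lstrip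
  calc ((List.dropWhile PySem.Chars.isspace (List.dropWhile PySem.Chars.isspace l).reverse).reverse).length
      = (List.dropWhile PySem.Chars.isspace (List.dropWhile PySem.Chars.isspace l).reverse).length := by
        simp
    _ ≤ (List.dropWhile PySem.Chars.isspace l).reverse.length := List.length_dropWhile_le _ _
    _ ≤ l.length := by simpa using List.length_dropWhile_le _ _
theorem pvSplitOnMax1_go (sub : List Char) :
    ∀ fuel (l cur : List Char) (acc : List (List Char)), l.length < fuel →
    PySem.Chars.splitOnMax.go sub fuel 1 l cur acc =
      if pvHOcc sub l then
        acc.reverse ++ [cur.reverse ++ l.take (pvFIdx sub l), l.drop (pvFIdx sub l + sub.length)]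
      else acc.reverse ++ [cur.reverse ++ l] := by
  intro fuel
  induction fuel with
  | zero => intro l cur acc h; omega
  | succ fuel ih =>
    intro l cur acc h
    rw [PySem.Chars.splitOnMax.go.eq_def]
    cases l with
    | nil => simp [pvHOcc]
    | cons c t =>
      simp only [Nat.succ_ne_zero]
      by_cases hp : sub.isPrefixOf (c :: t) = true
      · simp only [hp, if_true, one_ne_zero, if_neg]
        -- inner go with m = 0
        rw [PySem.Chars.splitOnMax.go.eq_def]
        have hocc : pvHOcc sub (c :: t) = true := by simp [pvHOcc, hp]
        have hidx : pvFIdx sub (c :: t) = 0 := by simp [pvFIdx, hp]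
        cases hd : List.drop sub.length (c :: t) with
        | nil =>
          cases fuel with
          | zero => simp [hocc, hidx, hd]
          | succ f => simp [hocc, hidx, hd]
        | cons d ds =>
          cases fuel with
          | zero =>
            -- fuel exhausted: c::t length < fuel+1 so length ≤ 0, contradiction
            simp at h
          | succ f => simp [hocc, hidx, hd]
      · simp only [Bool.not_eq_true] at hp
        simp only [hp, Bool.false_eq_true, if_false, one_ne_zero, if_neg]
        rw [ih t (c :: cur) acc (by simp at h ⊢; omega)]
        by_cases ho : pvHOcc sub t = true
        · have : pvHOcc sub (c :: t) = true := by simp [pvHOcc, ho]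
          simp [ho, this, pvFIdx, hp, List.drop_succ_cons, Nat.add_right_comm]
        · simp only [Bool.not_eq_true] at ho
          have : pvHOcc sub (c :: t) = false := by simp [pvHOcc, ho, hp]
          simp [ho, this]
theorem pvSplitOnMax1 (l sub : List Char) :
    PySem.Chars.splitOnMax l sub 1 =
      if pvHOcc sub l then [l.take (pvFIdx sub l), l.drop (pvFIdx sub l + sub.length)] else [l] := by
  unfold PySem.Chars.splitOnMax
  rw [if_neg (by omega)]
  show PySem.Chars.splitOnMax.go sub (l.length + 1) 1 l [] [] = _
  rw [pvSplitOnMax1_go sub (l.length + 1) l [] [] (by omega)]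
  split <;> simp

-- ===== PORT A =====
-- shared tail of A: the comment-stripping + first-word code the Python falls through to
def pvATail (line : String) : Option String :=
  let line1 := if PySem.Str.isIn ";" line then
      PySem.Str.strip ((((PySem.Str.split? line ";").getD [])[0]?).getD "") else line
  let line2 := if PySem.Str.isIn "//" line1 then
      PySem.Str.strip ((((PySem.Str.split? line1 "//").getD [])[0]?).getD "") else line1
  if line2 = "" then none
  else
    match PySem.Str.split₀ line2 with
    | [] => none
    | p :: _ => some p

def extract_mnemonic (instruction_line : String) : Option String :=
  let line := PySem.Str.strip instruction_line
  if line = "" then none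
  else if PySem.Str.startswith line ";" || PySem.Str.startswith line "//" then none
  else if PySem.Str.startswith line "." then none
  else if PySem.Str.isIn ":" line && !(PySem.Str.startswith line " " || PySem.Str.startswith line "\t") then
    let label_part := (((PySem.Str.split? line ":").getD [])[0]?).getD ""
    if PySem.Str.strIsalnum (PySem.Str.replace (PySem.Str.replace label_part "_" "") "." "") then
      let after_colon := PySem.Str.strip ((((PySem.Str.splitMax? line ":" 1).getD [])[1]?).getD "")
      if h : after_colon ≠ "" then extract_mnemonic after_colon else none
    else pvATail line
  else pvATail line
termination_by instruction_line.toList.length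
decreasing_by
  by_cases hocc : pvHOcc [':'] (PySem.Chars.strip instruction_line.toList) = true
  · have hX : ((((PySem.Str.splitMax? (PySem.Str.strip instruction_line) ":" 1).getD [])[1]?).getD "").toList
        = (PySem.Chars.strip instruction_line.toList).drop (pvFIdx [':'] (PySem.Chars.strip instruction_line.toList) + 1) := by
      simp [PySem.Str.splitMax?, PySem.Chars.splitMax?, pvSplitOnMax1, hocc]
    have hnil : (PySem.Chars.strip instruction_line.toList) ≠ [] := by
      intro hcon; rw [hcon] at hocc; simp [pvHOcc] at hocc
    have h1 : (PySem.Str.strip ((((PySem.Str.splitMax? (PySem.Str.strip instruction_line) ":" 1).getD [])[1]?).getD "")).toList.length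
        ≤ ((((PySem.Str.splitMax? (PySem.Str.strip instruction_line) ":" 1).getD [])[1]?).getD "").toList.length := by
      rw [PySem.Str.toList_strip]; exact pvStrip_length_le _
    have h2 : (PySem.Str.strip instruction_line).toList.length ≤ instruction_line.toList.length := by
      rw [PySem.Str.toList_strip]; exact pvStrip_length_le _
    rw [hX] at h1
    simp only [List.length_drop] at h1
    rw [PySem.Str.toList_strip] at h2
    have h3 : 1 ≤ (PySem.Chars.strip instruction_line.toList).length := by
      cases hc : (PySem.Chars.strip instruction_line.toList) with
      | nil => exact absurd hc hnil
      | cons a b => simp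
    omega
  · exfalso; apply h
    have : (((PySem.Str.splitMax? (PySem.Str.strip instruction_line) ":" 1).getD [])[1]?).getD "" = "" := by
      simp [PySem.Str.splitMax?, PySem.Chars.splitMax?, pvSplitOnMax1, hocc]
    show PySem.Str.strip ((((PySem.Str.splitMax? (PySem.Str.strip instruction_line) ":" 1).getD [])[1]?).getD "") = ""
    rw [this]
    rfl

-- ===== PORT B =====
-- one step of B's for-loop over the two comment markers
def pvBCut (line marker : String) : String :=
  let pos := PySem.Str.find line marker
  if pos = -1 then line
  else PySem.Str.strip (PySem.Str.slice line none (some pos))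

-- B's label-peeling while-loop: `none` = return None, `some line` = break with this line
def pvBLoop (line : String) : Option String :=
  if line = "" then none
  else if PySem.Str.startswith line ";" || PySem.Str.startswith line "//" ||
          PySem.Str.startswith line "." then none
  else
    let colon := PySem.Str.find line ":"
    if h : colon = -1 then some line
    else
      let head := PySem.Str.slice line none (some colon)
      if !(head.toList.all fun c => PySem.Chars.isalnum c || c == '.' || c == '_') then some line
      else if head.toList.all (fun c => c == '.' || c == '_') then some line
      else pvBLoop (PySem.Str.strip (PySem.Str.slice line (some (colon + 1)) none))
termination_by line.toList.length
decreasing_by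
  have hne : PySem.Str.find line ":" ≠ -1 := h
  have hnil : line.toList ≠ [] := by
    intro hcon
    apply hne
    show PySem.Str.find line ":" = -1
    unfold PySem.Str.find PySem.Chars.find
    rw [hcon, PySem.Chars.find.go.eq_def]
    simp
  have h0 : (0:Int) ≤ PySem.Str.find line ":" := by
    have hge : (-1:Int) ≤ PySem.Chars.find line.toList [':'] := PySem.Chars.neg_one_le_find _ _
    have heq : PySem.Str.find line ":" = PySem.Chars.find line.toList [':'] := rfl
    rw [heq] at hne ⊢
    omega
  have hk : PySem.Str.find line ":" + 1 = (((PySem.Str.find line ":").toNat + 1 : Nat) : Int) := by omega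
  rw [hk]
  have h1 : (PySem.Str.strip (PySem.Str.slice line (some (((PySem.Str.find line ":").toNat + 1 : Nat) : Int)))).toList.length
      ≤ (PySem.Str.slice line (some (((PySem.Str.find line ":").toNat + 1 : Nat) : Int))).toList.length := by
    rw [PySem.Str.toList_strip]; exact pvStrip_length_le _
  have h2 : (PySem.Str.slice line (some (((PySem.Str.find line ":").toNat + 1 : Nat) : Int))).toList
      = line.toList.drop ((PySem.Str.find line ":").toNat + 1) := by
    rw [PySem.Str.toList_slice]
    exact PySem.List.slice_from_natCast _ _
  rw [h2] at h1
  simp only [List.length_drop] at h1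
  have h3 : 1 ≤ line.toList.length := by
    cases hc : line.toList with
    | nil => exact absurd hc hnil
    | cons a b => simp
  omega

def extract_mnemonic_alt (instruction_line : String) : Option String :=
  match pvBLoop (PySem.Str.strip instruction_line) with
  | none => none
  | some line =>
    let line := [";", "//"].foldl pvBCut line
    match PySem.Str.split₀ line with
    | [] => none
    | w :: _ => some w

-- ===== PRECONDITION & SPEC =====
def Spec_extract_mnemonic (instruction_line : String) (out : Option String) : Prop := out = extract_mnemonic_alt instruction_line
instance (instruction_line : String) (out : Option String) : Decidable (Spec_extract_mnemonic instruction_line out) := by unfold Spec_extract_mnemonic; infer_instance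

-- ===== CLAIM (what is proved, stated in full; the proofs are below) =====
def Claim_equal_extract_mnemonic : Prop := ∀ (instruction_line : String), Dom_extract_mnemonic instruction_line → Spec_extract_mnemonic instruction_line (extract_mnemonic instruction_line)

-- ===== LEMMAS AND PROOFS =====

theorem pvFind_go_eq (sub : List Char) (hs : sub ≠ []) :
    ∀ (l : List Char) (k : Nat), PySem.Chars.find.go sub l k =
      if pvHOcc sub l then ((k + pvFIdx sub l : Nat) : Int) else -1 := by
  intro l
  induction l with
  | nil =>
    intro k
    rw [PySem.Chars.find.go.eq_def]
    simp [pvHOcc, List.isEmpty_iff, hs]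
  | cons c t ih =>
    intro k
    rw [PySem.Chars.find.go.eq_def]
    by_cases hp : sub.isPrefixOf (c :: t) = true
    · simp [hp, pvHOcc, pvFIdx]
    · simp only [Bool.not_eq_true] at hp
      simp only [hp, if_neg, Bool.false_eq_true, ite_false, ih (k + 1), pvHOcc, pvFIdx, hp,
        Bool.false_or]
      by_cases ho : pvHOcc sub t = true
      · simp [ho]; push_cast; ring
      · simp only [Bool.not_eq_true] at ho; simp [ho]
theorem pvFind_eq (l sub : List Char) (hs : sub ≠ []) :
    PySem.Chars.find l sub = if pvHOcc sub l then ((pvFIdx sub l : Nat) : Int) else -1 := by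
  unfold PySem.Chars.find
  rw [pvFind_go_eq sub hs l 0]
  simp
theorem pvSplitOn_go (sub : List Char) (hs : sub ≠ []) :
    ∀ fuel (l cur : List Char) (acc : List (List Char)), l.length < fuel →
    ∃ rest, PySem.Chars.splitOn.go sub fuel l cur acc =
      acc.reverse ++ (cur.reverse ++ l.take (if pvHOcc sub l then pvFIdx sub l else l.length)) :: rest := by
  intro fuel
  induction fuel with
  | zero => intro l cur acc h; omega
  | succ fuel ih =>
    intro l cur acc h
    rw [PySem.Chars.splitOn.go.eq_def]
    cases l with
    | nil => exact ⟨[], by simp [pvHOcc]⟩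
    | cons c t =>
      by_cases hp : sub.isPrefixOf (c :: t) = true
      · have hocc : pvHOcc sub (c :: t) = true := by simp [pvHOcc, hp]
        have hidx : pvFIdx sub (c :: t) = 0 := by simp [pvFIdx, hp]
        simp only [hp, if_true]
        have hsl : 1 ≤ sub.length := by cases sub with | nil => exact absurd rfl hs | cons a b => simp
        have hlen : (List.drop sub.length (c :: t)).length < fuel := by
          simp only [List.length_drop, List.length_cons] at *
          omega
        obtain ⟨rest, hrest⟩ := ih (List.drop sub.length (c :: t)) [] (cur.reverse :: acc) hlen
        refine ⟨(List.take (if pvHOcc sub (List.drop sub.length (c :: t)) = true then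
            pvFIdx sub (List.drop sub.length (c :: t))
          else (List.drop sub.length (c :: t)).length) (List.drop sub.length (c :: t))) :: rest, ?_⟩
        rw [hrest]
        simp [hocc, hidx]
      · simp only [Bool.not_eq_true] at hp
        simp only [hp, Bool.false_eq_true, if_false]
        obtain ⟨rest, hrest⟩ := ih t (c :: cur) acc (by simp at h ⊢; omega)
        refine ⟨rest, ?_⟩
        rw [hrest]
        by_cases ho : pvHOcc sub t = true
        · have h1 : pvHOcc sub (c :: t) = true := by simp [pvHOcc, ho]
          simp [ho, h1, pvFIdx, hp]
        · simp only [Bool.not_eq_true] at ho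
          have h1 : pvHOcc sub (c :: t) = false := by simp [pvHOcc, ho, hp]
          simp [ho, h1]
theorem pvSplitOn_head (l sub : List Char) (hs : sub ≠ []) :
    ∃ rest, PySem.Chars.splitOn l sub =
      (l.take (if pvHOcc sub l then pvFIdx sub l else l.length)) :: rest := by
  unfold PySem.Chars.splitOn
  obtain ⟨rest, hrest⟩ := pvSplitOn_go sub hs (l.length + 1) l [] [] (by omega)
  exact ⟨rest, by simpa using hrest⟩
theorem pvReplace_go (c : Char) :
    ∀ fuel (l acc : List Char), l.length ≤ fuel →
    PySem.Chars.replace.go [c] [] fuel l acc = acc.reverse ++ l.filter (fun x => !(x == c)) := by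
  intro fuel
  induction fuel with
  | zero =>
    intro l acc h
    rw [PySem.Chars.replace.go.eq_def]
    have : l = [] := by cases l <;> simp_all
    subst this; simp
  | succ fuel ih =>
    intro l acc h
    rw [PySem.Chars.replace.go.eq_def]
    cases l with
    | nil => simp
    | cons d t =>
      by_cases hp : [c].isPrefixOf (d :: t) = true
      · have hd : d = c := by simp [List.isPrefixOf] at hp; exact hp.symm
        subst hd
        simp only [hp, if_true, List.length_cons] at *
        have : List.drop ([d].length) (d :: t) = t := by simp
        simp only [List.length_cons, List.length_nil, zero_add] at this ⊢
        rw [this, List.reverse_nil, List.nil_append, ih t acc (by omega)]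
        simp
      · have hd : ¬ d = c := by simp [List.isPrefixOf] at hp; exact fun hh => hp hh.symm
        simp only [hp, Bool.false_eq_true, if_false] at *
        rw [ih t (d :: acc) (by simp at h; omega)]
        have : (!(d == c)) = true := by simp [hd]
        simp [List.filter, this]
theorem pvReplace_single (l : List Char) (c : Char) :
    PySem.Chars.replace l [c] [] = l.filter (fun x => !(x == c)) := by
  unfold PySem.Chars.replace
  rw [if_neg (by simp)]
  exact pvReplace_go c l.length l [] le_rfl
theorem pvGate (h : List Char) :
    PySem.Chars.strIsalnum (PySem.Chars.replace (PySem.Chars.replace h ['_'] []) ['.'] []) =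
      ((h.all fun c => PySem.Chars.isalnum c || c == '.' || c == '_') &&
        !(h.all fun c => c == '.' || c == '_')) := by
  rw [pvReplace_single, pvReplace_single]
  unfold PySem.Chars.strIsalnum
  rw [Bool.eq_iff_iff]
  simp [List.all_eq_true, List.filter_filter,
    List.eq_nil_iff_forall_not_mem, List.mem_filter]
  constructor
  · rintro ⟨⟨x, hx1, hx2, hx3⟩, hall⟩
    exact ⟨fun y hy => by rcases hall y hy with h1 | h2 <;> tauto, x, hx1, hx2, hx3⟩
  · rintro ⟨hall, x, hx1, hx2, hx3⟩
    exact ⟨⟨x, hx1, hx2, hx3⟩, fun y hy => by rcases hall y hy with (h1 | h2) | h3 <;> tauto⟩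
theorem pvRstrip_prefix (l : List Char) : PySem.Chars.rstrip l <+: l := by
  unfold PySem.Chars.rstrip
  have h := List.dropWhile_suffix (l := l.reverse) PySem.Chars.isspace
  have := h.reverse
  simpa using this

theorem pvLstrip_head (l : List Char) (c : Char) (t : List Char)
    (h : List.dropWhile PySem.Chars.isspace l = c :: t) : PySem.Chars.isspace c = false := by
  have hne : List.dropWhile PySem.Chars.isspace l ≠ [] := by simp [h]
  have := List.head_dropWhile_not (p := PySem.Chars.isspace) (l := l) hne
  simpa [h] using this

theorem pvDropWhile_eq_self_of_head {p : Char → Bool} (c : Char) (t : List Char)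
    (h : p c = false) : List.dropWhile p (c :: t) = c :: t := by
  simp [List.dropWhile, h]

theorem pvStrip_head_not_space (l : List Char) (c : Char) (t : List Char)
    (h : PySem.Chars.strip l = c :: t) : PySem.Chars.isspace c = false := by
  unfold PySem.Chars.strip at h
  have hpre : PySem.Chars.rstrip (PySem.Chars.lstrip l) <+: PySem.Chars.lstrip l := pvRstrip_prefix _
  rw [h] at hpre
  obtain ⟨r, hr⟩ := hpre
  have : List.dropWhile PySem.Chars.isspace l = c :: (t ++ r) := by
    unfold PySem.Chars.lstrip at hr; simpa using hr.symm
  exact pvLstrip_head l c _ this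
theorem pvStrip_idem (l : List Char) : PySem.Chars.strip (PySem.Chars.strip l) = PySem.Chars.strip l := by
  -- lstrip (strip l) = strip l
  have h1 : PySem.Chars.lstrip (PySem.Chars.strip l) = PySem.Chars.strip l := by
    cases hs : PySem.Chars.strip l with
    | nil => simp [PySem.Chars.lstrip]
    | cons c t =>
      have := pvStrip_head_not_space l c t hs
      unfold PySem.Chars.lstrip
      exact pvDropWhile_eq_self_of_head c t this
  -- rstrip (rstrip x) = rstrip x
  have h2 : ∀ x : List Char, PySem.Chars.rstrip (PySem.Chars.rstrip x) = PySem.Chars.rstrip x := by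
    intro x
    unfold PySem.Chars.rstrip
    simp [List.dropWhile_idempotent]
  calc PySem.Chars.strip (PySem.Chars.strip l)
      = PySem.Chars.rstrip (PySem.Chars.lstrip (PySem.Chars.strip l)) := rfl
    _ = PySem.Chars.rstrip (PySem.Chars.strip l) := by rw [h1]
    _ = PySem.Chars.rstrip (PySem.Chars.rstrip (PySem.Chars.lstrip l)) := rfl
    _ = PySem.Chars.strip l := h2 _
theorem pvBCut_eq (l m : String) (hm : m.toList ≠ []) :
    (if PySem.Str.isIn m l then
        PySem.Str.strip ((((PySem.Str.split? l m).getD [])[0]?).getD "") else l) = pvBCut l m := by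
  unfold pvBCut
  by_cases hocc : pvHOcc m.toList l.toList = true
  · have hfind : PySem.Str.find l m = ((pvFIdx m.toList l.toList : Nat) : Int) := by
      show PySem.Chars.find l.toList m.toList = _
      rw [pvFind_eq _ _ hm, if_pos hocc]
    have hin : PySem.Str.isIn m l = true := by
      show (PySem.Chars.find l.toList m.toList != -1) = true
      rw [pvFind_eq _ _ hm, if_pos hocc]
      simp
    rw [if_pos hin, hfind, if_neg (by omega)]
    congr 1
    apply String.toList_inj.mp
    obtain ⟨rest, hsplit⟩ := pvSplitOn_head l.toList m.toList hm
    simp [PySem.Str.split?, PySem.Chars.split?, List.isEmpty_iff, hm, hsplit, hocc,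
      PySem.Str.toList_slice, PySem.Chars.slice, PySem.List.slice_to_natCast]
  · have hfind : PySem.Str.find l m = -1 := by
      show PySem.Chars.find l.toList m.toList = -1
      rw [pvFind_eq _ _ hm, if_neg hocc]
    have hin : PySem.Str.isIn m l = false := by
      show (PySem.Chars.find l.toList m.toList != -1) = false
      rw [pvFind_eq _ _ hm, if_neg hocc]
      simp
    rw [if_neg (by rw [show PySem.Str.isIn m l = ((PySem.Chars.find l.toList m.toList != -1)) from rfl, pvFind_eq _ _ hm, if_neg hocc]; simp), hfind, if_pos rfl]

theorem pvTail_eq (l : String) :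
    pvATail l = (match PySem.Str.split₀ ([";", "//"].foldl pvBCut l) with
      | [] => none
      | w :: _ => some w) := by
  unfold pvATail
  rw [List.foldl_cons, List.foldl_cons, List.foldl_nil]
  rw [← pvBCut_eq l ";" (by decide)]
  rw [← pvBCut_eq _ "//" (by decide)]
  by_cases h2 : (if PySem.Str.isIn "//" (if PySem.Str.isIn ";" l then
        PySem.Str.strip ((((PySem.Str.split? l ";").getD [])[0]?).getD "") else l) then
      PySem.Str.strip ((((PySem.Str.split? (if PySem.Str.isIn ";" l then
        PySem.Str.strip ((((PySem.Str.split? l ";").getD [])[0]?).getD "") else l) "//").getD [])[0]?).getD "")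
    else (if PySem.Str.isIn ";" l then
        PySem.Str.strip ((((PySem.Str.split? l ";").getD [])[0]?).getD "") else l)) = ""
  · rw [if_pos h2, h2]
    rfl
  · rw [if_neg h2]

theorem pvStrip_str_idem (s : String) :
    PySem.Str.strip (PySem.Str.strip s) = PySem.Str.strip s := by
  apply String.toList_inj.mp
  rw [PySem.Str.toList_strip, PySem.Str.toList_strip, pvStrip_idem]


-- one-step unfoldings of the two recursive ports, with the `let`s substituted
theorem pvA_eq (s : String) : extract_mnemonic s =
    (if PySem.Str.strip s = "" then none
     else if (PySem.Str.startswith (PySem.Str.strip s) ";" ||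
              PySem.Str.startswith (PySem.Str.strip s) "//") = true then none
     else if PySem.Str.startswith (PySem.Str.strip s) "." = true then none
     else if (PySem.Str.isIn ":" (PySem.Str.strip s) &&
              !(PySem.Str.startswith (PySem.Str.strip s) " " ||
                PySem.Str.startswith (PySem.Str.strip s) "\t")) = true then
       if PySem.Str.strIsalnum (PySem.Str.replace (PySem.Str.replace
            (((PySem.Str.split? (PySem.Str.strip s) ":").getD [])[0]?.getD "") "_" "") "." "") = true then
         if PySem.Str.strip (((PySem.Str.splitMax? (PySem.Str.strip s) ":" 1).getD [])[1]?.getD "") ≠ "" then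
           extract_mnemonic
             (PySem.Str.strip (((PySem.Str.splitMax? (PySem.Str.strip s) ":" 1).getD [])[1]?.getD ""))
         else none
       else pvATail (PySem.Str.strip s)
     else pvATail (PySem.Str.strip s)) := by
  rw [extract_mnemonic.eq_def]
  rfl

theorem pvB_eq (line : String) : pvBLoop line =
    (if line = "" then none
     else if (PySem.Str.startswith line ";" || PySem.Str.startswith line "//" ||
              PySem.Str.startswith line ".") = true then none
     else if PySem.Str.find line ":" = -1 then some line
     else if (!((PySem.Str.slice line none (some (PySem.Str.find line ":"))).toList.all
            fun c => PySem.Chars.isalnum c || c == '.' || c == '_')) = true then some line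
     else if ((PySem.Str.slice line none (some (PySem.Str.find line ":"))).toList.all
            fun c => c == '.' || c == '_') = true then some line
     else pvBLoop (PySem.Str.strip (PySem.Str.slice line (some (PySem.Str.find line ":" + 1)) none))) := by
  rw [pvBLoop.eq_def]
  rfl

-- B's tail phase as a named function of the loop's result (proof-only; keeps goals small)
def pvBFinish : Option String → Option String
  | none => none
  | some line =>
    match PySem.Str.split₀ ([";", "//"].foldl pvBCut line) with
    | [] => none
    | w :: _ => some w

theorem pvAlt_eq (s : String) : extract_mnemonic_alt s = pvBFinish (pvBLoop (PySem.Str.strip s)) := by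
  unfold extract_mnemonic_alt
  cases h : pvBLoop (PySem.Str.strip s) with
  | none => rfl
  | some l => rfl

theorem pvTail_fin (l : String) : pvATail l = pvBFinish (some l) := by
  rw [pvTail_eq]; rfl

theorem pvB_none1 : pvBLoop "" = none := by
  rw [pvB_eq, if_pos rfl]

theorem pvB_none2 (line : String) (h : (PySem.Str.startswith line ";" || PySem.Str.startswith line "//" || PySem.Str.startswith line ".") = true) : pvBLoop line = none := by
  rw [pvB_eq]
  by_cases he : line = ""
  · rw [if_pos he]
  · rw [if_neg he, if_pos h]

theorem pvB_break1 (line : String) (he : ¬ line = "") (hc : ¬ (PySem.Str.startswith line ";" || PySem.Str.startswith line "//" || PySem.Str.startswith line ".") = true)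
    (hf : PySem.Str.find line ":" = -1) : pvBLoop line = some line := by
  rw [pvB_eq, if_neg he, if_neg hc, if_pos hf]

theorem pvB_break2 (line : String) (he : ¬ line = "") (hc : ¬ (PySem.Str.startswith line ";" || PySem.Str.startswith line "//" || PySem.Str.startswith line ".") = true)
    (hf : ¬ PySem.Str.find line ":" = -1) (hv : (!((PySem.Str.slice line none (some (PySem.Str.find line ":"))).toList.all fun c => PySem.Chars.isalnum c || c == '.' || c == '_')) = true) : pvBLoop line = some line := by
  rw [pvB_eq, if_neg he, if_neg hc, if_neg hf, if_pos hv]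

theorem pvB_break3 (line : String) (he : ¬ line = "") (hc : ¬ (PySem.Str.startswith line ";" || PySem.Str.startswith line "//" || PySem.Str.startswith line ".") = true)
    (hf : ¬ PySem.Str.find line ":" = -1) (hv : ¬ (!((PySem.Str.slice line none (some (PySem.Str.find line ":"))).toList.all fun c => PySem.Chars.isalnum c || c == '.' || c == '_')) = true)
    (hsp : ((PySem.Str.slice line none (some (PySem.Str.find line ":"))).toList.all fun c => c == '.' || c == '_') = true) : pvBLoop line = some line := by
  rw [pvB_eq, if_neg he, if_neg hc, if_neg hf, if_neg hv, if_pos hsp]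

theorem pvB_step (line : String) (he : ¬ line = "") (hc : ¬ (PySem.Str.startswith line ";" || PySem.Str.startswith line "//" || PySem.Str.startswith line ".") = true)
    (hf : ¬ PySem.Str.find line ":" = -1) (hv : ¬ (!((PySem.Str.slice line none (some (PySem.Str.find line ":"))).toList.all fun c => PySem.Chars.isalnum c || c == '.' || c == '_')) = true)
    (hsp : ¬ ((PySem.Str.slice line none (some (PySem.Str.find line ":"))).toList.all fun c => c == '.' || c == '_') = true) : pvBLoop line =
      pvBLoop (PySem.Str.strip (PySem.Str.slice line (some (PySem.Str.find line ":" + 1)) none)) := by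
  rw [pvB_eq, if_neg he, if_neg hc, if_neg hf, if_neg hv, if_neg hsp]

theorem pvA_none1 (s : String) (h : PySem.Str.strip s = "") : extract_mnemonic s = none := by
  rw [pvA_eq, if_pos h]

theorem pvA_none2 (s : String) (h12 : (PySem.Str.startswith (PySem.Str.strip s) ";" || PySem.Str.startswith (PySem.Str.strip s) "//") = true) : extract_mnemonic s = none := by
  rw [pvA_eq]
  by_cases he : PySem.Str.strip s = ""
  · rw [if_pos he]
  · rw [if_neg he, if_pos h12]

theorem pvA_none3 (s : String) (he : ¬ PySem.Str.strip s = "") (h12 : ¬ (PySem.Str.startswith (PySem.Str.strip s) ";" || PySem.Str.startswith (PySem.Str.strip s) "//") = true)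
    (h3 : PySem.Str.startswith (PySem.Str.strip s) "." = true) : extract_mnemonic s = none := by
  rw [pvA_eq, if_neg he, if_neg h12, if_pos h3]

theorem pvA_tail1 (s : String) (he : ¬ PySem.Str.strip s = "") (h12 : ¬ (PySem.Str.startswith (PySem.Str.strip s) ";" || PySem.Str.startswith (PySem.Str.strip s) "//") = true)
    (h3 : ¬ PySem.Str.startswith (PySem.Str.strip s) "." = true) (hlab : ¬ (PySem.Str.isIn ":" (PySem.Str.strip s) && !(PySem.Str.startswith (PySem.Str.strip s) " " || PySem.Str.startswith (PySem.Str.strip s) "\t")) = true) : extract_mnemonic s = pvATail (PySem.Str.strip s) := by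
  rw [pvA_eq, if_neg he, if_neg h12, if_neg h3, if_neg hlab]

theorem pvA_tail2 (s : String) (he : ¬ PySem.Str.strip s = "") (h12 : ¬ (PySem.Str.startswith (PySem.Str.strip s) ";" || PySem.Str.startswith (PySem.Str.strip s) "//") = true)
    (h3 : ¬ PySem.Str.startswith (PySem.Str.strip s) "." = true) (hlab : (PySem.Str.isIn ":" (PySem.Str.strip s) && !(PySem.Str.startswith (PySem.Str.strip s) " " || PySem.Str.startswith (PySem.Str.strip s) "\t")) = true) (hg : ¬ PySem.Str.strIsalnum (PySem.Str.replace (PySem.Str.replace (((PySem.Str.split? (PySem.Str.strip s) ":").getD [])[0]?.getD "") "_" "") "." "") = true) :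
    extract_mnemonic s = pvATail (PySem.Str.strip s) := by
  rw [pvA_eq, if_neg he, if_neg h12, if_neg h3, if_pos hlab, if_neg hg]

theorem pvA_label (s : String) (he : ¬ PySem.Str.strip s = "") (h12 : ¬ (PySem.Str.startswith (PySem.Str.strip s) ";" || PySem.Str.startswith (PySem.Str.strip s) "//") = true)
    (h3 : ¬ PySem.Str.startswith (PySem.Str.strip s) "." = true) (hlab : (PySem.Str.isIn ":" (PySem.Str.strip s) && !(PySem.Str.startswith (PySem.Str.strip s) " " || PySem.Str.startswith (PySem.Str.strip s) "\t")) = true) (hg : PySem.Str.strIsalnum (PySem.Str.replace (PySem.Str.replace (((PySem.Str.split? (PySem.Str.strip s) ":").getD [])[0]?.getD "") "_" "") "." "") = true) :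
    extract_mnemonic s = (if PySem.Str.strip (((PySem.Str.splitMax? (PySem.Str.strip s) ":" 1).getD [])[1]?.getD "") ≠ "" then extract_mnemonic (PySem.Str.strip (((PySem.Str.splitMax? (PySem.Str.strip s) ":" 1).getD [])[1]?.getD "")) else none) := by
  rw [pvA_eq, if_neg he, if_neg h12, if_neg h3, if_pos hlab, if_pos hg]

set_option maxHeartbeats 1000000 in
theorem pvMain (n : Nat) : ∀ s : String, s.toList.length ≤ n →
    extract_mnemonic s = extract_mnemonic_alt s := by
  induction n with
  | zero =>
    intro s hs
    have hz : s = "" := by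
      apply String.toList_inj.mp
      cases hc : s.toList with
      | nil => rfl
      | cons a b => rw [hc] at hs; simp at hs
    subst hz
    rw [pvAlt_eq, pvA_none1 "" rfl]
    rw [show PySem.Str.strip "" = "" from rfl, pvB_none1]
    rfl
  | succ n ih =>
    intro s hs
    rw [pvAlt_eq]
    by_cases hemp : PySem.Str.strip s = ""
    · rw [pvA_none1 s hemp, hemp, pvB_none1]
      rfl
    · by_cases hs1 : PySem.Str.startswith (PySem.Str.strip s) ";" = true
      · rw [pvA_none2 s (by rw [hs1]; rfl), pvB_none2 _ (by rw [hs1]; rfl)]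
        rfl
      · rw [Bool.not_eq_true] at hs1
        by_cases hs2 : PySem.Str.startswith (PySem.Str.strip s) "//" = true
        · rw [pvA_none2 s (by rw [hs1, hs2]; rfl), pvB_none2 _ (by rw [hs1, hs2]; rfl)]
          rfl
        · rw [Bool.not_eq_true] at hs2
          have h12 : ¬ (PySem.Str.startswith (PySem.Str.strip s) ";" || PySem.Str.startswith (PySem.Str.strip s) "//") = true := by rw [hs1, hs2]; simp
          by_cases hs3 : PySem.Str.startswith (PySem.Str.strip s) "." = true
          · rw [pvA_none3 s hemp h12 hs3, pvB_none2 _ (by rw [hs1, hs2, hs3]; rfl)]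
            rfl
          · rw [Bool.not_eq_true] at hs3
            have h3 : ¬ PySem.Str.startswith (PySem.Str.strip s) "." = true := by rw [hs3]; simp
            have hBc : ¬ (PySem.Str.startswith (PySem.Str.strip s) ";" || PySem.Str.startswith (PySem.Str.strip s) "//" ||
                PySem.Str.startswith (PySem.Str.strip s) ".") = true := by rw [hs1, hs2, hs3]; simp
            obtain ⟨c, t, hL⟩ : ∃ c t, (PySem.Str.strip s).toList = c :: t := by
              cases hc : (PySem.Str.strip s).toList with
              | nil => exact absurd (String.toList_inj.mp hc) hemp
              | cons a b => exact ⟨a, b, rfl⟩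
            have hLc : PySem.Chars.strip s.toList = c :: t := by
              rw [← PySem.Str.toList_strip, hL]
            have hcsp : PySem.Chars.isspace c = false := pvStrip_head_not_space _ _ _ hLc
            have hsw1 : PySem.Str.startswith (PySem.Str.strip s) " " = false := by
              have hcs : ¬ (' ' == c) = true := by
                intro hh
                simp at hh
                rw [← hh] at hcsp
                exact absurd hcsp (by decide)
              rw [PySem.Str.startswith_eq, hL]
              simp [PySem.Chars.startswith, List.isPrefixOf, hcs]
            have hsw2 : PySem.Str.startswith (PySem.Str.strip s) "\t" = false := by
              have hcs : ¬ ('\t' == c) = true := by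
                intro hh
                simp at hh
                rw [← hh] at hcsp
                exact absurd hcsp (by decide)
              rw [PySem.Str.startswith_eq, hL]
              simp [PySem.Chars.startswith, List.isPrefixOf, hcs]
            by_cases hocc : pvHOcc [':'] (PySem.Str.strip s).toList = true
            · -- a colon is present
              have hfind : PySem.Str.find (PySem.Str.strip s) ":" = ((pvFIdx [':'] (PySem.Str.strip s).toList : Nat) : Int) := by
                show PySem.Chars.find (PySem.Str.strip s).toList [':'] = _
                rw [pvFind_eq _ _ (by decide), if_pos hocc]
              have hfind_ne : ¬ PySem.Str.find (PySem.Str.strip s) ":" = -1 := by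
                rw [hfind]; omega
              have hin : PySem.Str.isIn ":" (PySem.Str.strip s) = true := by
                show (PySem.Chars.find (PySem.Str.strip s).toList [':'] != -1) = true
                rw [pvFind_eq _ _ (by decide), if_pos hocc]; simp
              have hlab : (PySem.Str.isIn ":" (PySem.Str.strip s) && !(PySem.Str.startswith (PySem.Str.strip s) " " || PySem.Str.startswith (PySem.Str.strip s) "\t")) = true := by
                rw [hin, hsw1, hsw2]; rfl
              have hslice : (PySem.Str.slice (PySem.Str.strip s) none (some (PySem.Str.find (PySem.Str.strip s) ":"))).toList =
                  (PySem.Str.strip s).toList.take (pvFIdx [':'] (PySem.Str.strip s).toList) := by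
                rw [hfind, PySem.Str.toList_slice]
                exact PySem.List.slice_to_natCast _ _
              have hlabel : ((((PySem.Str.split? (PySem.Str.strip s) ":").getD [])[0]?).getD "").toList =
                  (PySem.Str.strip s).toList.take (pvFIdx [':'] (PySem.Str.strip s).toList) := by
                obtain ⟨rest, hsp⟩ := pvSplitOn_head (PySem.Str.strip s).toList [':'] (by decide)
                have hsome : PySem.Str.split? (PySem.Str.strip s) ":" =
                    some (List.map String.ofList (PySem.Chars.splitOn (PySem.Str.strip s).toList [':'])) := rfl
                rw [hsome, hsp, if_pos hocc]
                simp only [Option.getD_some, List.map_cons, List.getElem?_cons_zero,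
                  Option.getD_some, String.toList_ofList]
              have hgate : (PySem.Str.strIsalnum (PySem.Str.replace (PySem.Str.replace (((PySem.Str.split? (PySem.Str.strip s) ":").getD [])[0]?.getD "") "_" "") "." "") = true) = (((((PySem.Str.strip s).toList.take (pvFIdx [':'] (PySem.Str.strip s).toList)).all
                    fun c => PySem.Chars.isalnum c || c == '.' || c == '_') &&
                  !(((PySem.Str.strip s).toList.take (pvFIdx [':'] (PySem.Str.strip s).toList)).all
                    fun c => c == '.' || c == '_')) = true) := by
                rw [PySem.Str.strIsalnum_eq, PySem.Str.toList_replace, PySem.Str.toList_replace, hlabel]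
                rw [show ("_" : String).toList = ['_'] from rfl, show ("." : String).toList = ['.'] from rfl,
                  show ("" : String).toList = [] from rfl, pvGate]
              by_cases hval : (((PySem.Str.strip s).toList.take (pvFIdx [':'] (PySem.Str.strip s).toList)).all
                  fun c => PySem.Chars.isalnum c || c == '.' || c == '_') = true
              · by_cases hsep : (((PySem.Str.strip s).toList.take (pvFIdx [':'] (PySem.Str.strip s).toList)).all
                    fun c => c == '.' || c == '_') = true
                · -- all-separator head: no label for A either ("".isalnum() is false)
                  rw [pvA_tail2 s hemp h12 h3 hlab (by rw [hgate, hval, hsep]; simp)]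
                  rw [pvB_break3 _ hemp hBc hfind_ne (by rw [hslice, hval]; simp)
                    (by rw [hslice]; exact hsep)]
                  exact pvTail_fin _
                · rw [Bool.not_eq_true] at hsep
                  -- the label gate fires: A recurses, B loops
                  rw [pvA_label s hemp h12 h3 hlab (by rw [hgate, hval, hsep]; rfl)]
                  rw [pvB_step _ hemp hBc hfind_ne (by rw [hslice, hval]; simp)
                    (by rw [hslice, hsep]; simp)]
                  have hXeq : ((((PySem.Str.splitMax? (PySem.Str.strip s) ":" 1).getD [])[1]?).getD "").toList =
                      (PySem.Str.strip s).toList.drop (pvFIdx [':'] (PySem.Str.strip s).toList + 1) := by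
                    have hsm : PySem.Str.splitMax? (PySem.Str.strip s) ":" 1 =
                        some (List.map String.ofList (PySem.Chars.splitOnMax (PySem.Str.strip s).toList [':'] 1)) := rfl
                    rw [hsm, pvSplitOnMax1, if_pos hocc]
                    simp only [Option.getD_some, List.map_cons, List.map_nil,
                      List.getElem?_cons_succ, List.getElem?_cons_zero, Option.getD_some,
                      String.toList_ofList, List.length_cons, List.length_nil]
                  have harg : PySem.Str.strip (PySem.Str.slice (PySem.Str.strip s)
                        (some (PySem.Str.find (PySem.Str.strip s) ":" + 1)) none) = PySem.Str.strip (((PySem.Str.splitMax? (PySem.Str.strip s) ":" 1).getD [])[1]?.getD "") := by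
                    apply String.toList_inj.mp
                    have hcast : PySem.Str.find (PySem.Str.strip s) ":" + 1 =
                        (((pvFIdx [':'] (PySem.Str.strip s).toList + 1 : Nat)) : Int) := by
                      rw [hfind]; push_cast; ring
                    have hsl : (PySem.Str.slice (PySem.Str.strip s)
                          (some (PySem.Str.find (PySem.Str.strip s) ":" + 1)) none).toList =
                        (PySem.Str.strip s).toList.drop (pvFIdx [':'] (PySem.Str.strip s).toList + 1) := by
                      rw [hcast, PySem.Str.toList_slice]
                      exact PySem.List.slice_from_natCast _ _
                    rw [PySem.Str.toList_strip, PySem.Str.toList_strip, hXeq, hsl]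
                  rw [harg]
                  by_cases hafter : (PySem.Str.strip (((PySem.Str.splitMax? (PySem.Str.strip s) ":" 1).getD [])[1]?.getD "")) = ""
                  · rw [if_neg (by simp [hafter]), hafter, pvB_none1]
                    rfl
                  · rw [if_pos hafter]
                    have hAlen : (PySem.Str.strip (((PySem.Str.splitMax? (PySem.Str.strip s) ":" 1).getD [])[1]?.getD "")).toList.length ≤ n := by
                      have h1 : (PySem.Str.strip (((PySem.Str.splitMax? (PySem.Str.strip s) ":" 1).getD [])[1]?.getD "")).toList.length ≤
                          ((((PySem.Str.splitMax? (PySem.Str.strip s) ":" 1).getD [])[1]?).getD "").toList.length := by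
                        rw [PySem.Str.toList_strip]
                        exact pvStrip_length_le _
                      rw [hXeq, List.length_drop] at h1
                      have h2 : (PySem.Str.strip s).toList.length ≤ s.toList.length := by
                        rw [PySem.Str.toList_strip]
                        exact pvStrip_length_le _
                      have h3len : 1 ≤ (PySem.Str.strip s).toList.length := by rw [hL]; simp
                      omega
                    rw [ih _ hAlen, pvAlt_eq,
                      show PySem.Str.strip (PySem.Str.strip (((PySem.Str.splitMax? (PySem.Str.strip s) ":" 1).getD [])[1]?.getD "")) = (PySem.Str.strip (((PySem.Str.splitMax? (PySem.Str.strip s) ":" 1).getD [])[1]?.getD "")) from pvStrip_str_idem _]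
              · rw [Bool.not_eq_true] at hval
                rw [pvA_tail2 s hemp h12 h3 hlab (by rw [hgate, hval]; simp)]
                rw [pvB_break2 _ hemp hBc hfind_ne (by rw [hslice, hval]; rfl)]
                exact pvTail_fin _
            · -- no colon: A falls through, B breaks with the same line
              have hin : PySem.Str.isIn ":" (PySem.Str.strip s) = false := by
                show (PySem.Chars.find (PySem.Str.strip s).toList [':'] != -1) = false
                rw [pvFind_eq _ _ (by decide), if_neg hocc]
                simp
              have hfind : PySem.Str.find (PySem.Str.strip s) ":" = -1 := by
                show PySem.Chars.find (PySem.Str.strip s).toList [':'] = -1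
                rw [pvFind_eq _ _ (by decide), if_neg hocc]
              rw [pvA_tail1 s hemp h12 h3 (by rw [hin]; simp)]
              rw [pvB_break1 _ hemp hBc hfind]
              exact pvTail_fin _

-- ===== VERDICT (by name: the statement is the Claim_ definition above) =====
theorem extract_mnemonic_spec : Claim_equal_extract_mnemonic := by
  intro s _
  unfold Spec_extract_mnemonic
  exact pvMain s.toList.length s le_rfl
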